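-- pv_equiv track=rewrite | github.com/project-chip/connectedhomeip | src/lib/asn1/gen_asn1oid.py | encodeOID
-- ===== SOURCE A (Python) =====
-- def encodeOID(oid):
--
--     assert len(oid) >= 2
--
--     oid = [(oid[0]*40 + oid[1])] + oid[2:]
--
--     encodedOID = []
--     for val in oid:
--         val, byte = divmod(val, 128)
--         seg = [byte]
--         while val > 0:
--             val, byte = divmod(val, 128)
--             seg.insert(0, byte + 0x80)
--         encodedOID += (seg)
--
--     return encodedOID
-- ===== SOURCE B (Python) =====
-- def encodeOID(oid):
--     assert len(oid) >= 2
--     values = [oid[0] * 40 + oid[1]] + oid[2:]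
--     out = []
--     for val in values:
--         # number of 7-bit chunks: smallest k >= 1 with 128**k > val
--         k = 1
--         while 128 ** k <= val:
--             k += 1
--         # emit big-endian directly by power-of-128 extraction, no list building
--         for i in range(k - 1, 0, -1):
--             out.append((val // 128 ** i) % 128 + 0x80)
--         out.append(val % 128)
--     return out
-- ===== Notes on version B (the rewrite author's own statement) =====
-- stated objective: alternative
-- what changed: B never builds a per-value digit list: it first counts the 7-bit chunks k (smallest k with 128**k > val) and then emits each byte big-endian directly as (val // 128**i) % 128, marking with 0x80 inside the loop, instead of A's prepend-with-mark while-loop over a mutable segment list.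
import Mathlib
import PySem

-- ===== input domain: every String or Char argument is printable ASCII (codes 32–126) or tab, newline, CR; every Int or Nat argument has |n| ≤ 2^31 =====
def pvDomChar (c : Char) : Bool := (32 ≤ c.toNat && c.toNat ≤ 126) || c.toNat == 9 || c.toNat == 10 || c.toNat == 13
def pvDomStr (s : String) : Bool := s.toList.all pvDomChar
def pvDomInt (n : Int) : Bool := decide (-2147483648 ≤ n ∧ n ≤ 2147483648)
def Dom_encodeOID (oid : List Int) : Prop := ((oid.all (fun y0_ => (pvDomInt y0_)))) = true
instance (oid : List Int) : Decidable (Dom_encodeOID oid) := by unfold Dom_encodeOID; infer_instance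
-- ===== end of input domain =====

-- B replaces A's digit-list building (prepend-with-mark while-loop) by first counting
-- the 7-bit chunks and then extracting each chunk big-endian by power-of-128 division;
-- objective: alternative decomposition, same cost.

-- ===== PORT A =====
-- A's inner `while val > 0: val, byte = divmod(val, 128); seg.insert(0, byte + 0x80)`
def encodeOID_whileA (val : Int) (seg : List Int) : List Int :=
  if h : val > 0 then
    encodeOID_whileA (PySem.Int.floordiv val 128) ((PySem.Int.mod val 128 + 0x80) :: seg)
  else seg
termination_by val.toNat
decreasing_by
  have h1 : PySem.Int.floordiv val 128 < val :=
    (PySem.Int.floordiv_lt_iff_lt_mul (by omega)).2 (by nlinarith)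
  omega

def encodeOID (oid : List Int) : List Int :=
  -- assert len(oid) >= 2 (AssertionError excluded by Pre_); pyGet? getD 0 is only a totaliser
  let oid' := ((PySem.List.pyGet? oid 0).getD 0 * 40 + (PySem.List.pyGet? oid 1).getD 0)
                :: PySem.List.slice oid (some 2) none
  oid'.foldl (fun encodedOID val =>
    let byte := PySem.Int.mod val 128
    let val' := PySem.Int.floordiv val 128
    encodedOID ++ encodeOID_whileA val' [byte]) []

-- ===== PORT B =====
-- B's `k = 1; while 128 ** k <= val: k += 1`
def encodeOID_countK (val : Int) (k : Nat) : Nat :=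
  if h : (128 : Int) ^ k ≤ val then encodeOID_countK val (k + 1) else k
termination_by val.toNat + 1 - 128 ^ k
decreasing_by
  have h1 : ((128 : Nat) ^ k : Int) ≤ val := by push_cast; exact h
  have h2 : (128 : Nat) ^ k ≤ val.toNat := by omega
  have h3 : (128 : Nat) ^ k < 128 ^ (k + 1) := by
    exact Nat.pow_lt_pow_right (by omega) (by omega)
  omega

def encodeOID_alt (oid : List Int) : List Int :=
  let values := ((PySem.List.pyGet? oid 0).getD 0 * 40 + (PySem.List.pyGet? oid 1).getD 0)
                  :: PySem.List.slice oid (some 2) none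
  values.foldl (fun out val =>
    let k := encodeOID_countK val 1
    -- `for i in range(k-1, 0, -1): out.append((val // 128**i) % 128 + 0x80)`
    -- (i ≥ 1 throughout the range, so `i.toNat` is exact for Python's 128**i)
    let out' := (PySem.List.pyRange ((k : Int) - 1) 0 (-1)).foldl
      (fun out i =>
        out ++ [PySem.Int.mod (PySem.Int.floordiv val ((128 : Int) ^ i.toNat)) 128 + 0x80]) out
    out' ++ [PySem.Int.mod val 128]) []

-- ===== PRECONDITION & SPEC =====
-- Pre_: A asserts len(oid) >= 2 and raises AssertionError otherwise.
def Pre_encodeOID (oid : List Int) : Prop := 2 ≤ oid.length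
instance (oid : List Int) : Decidable (Pre_encodeOID oid) := by unfold Pre_encodeOID; infer_instance
def pvWitness_encodeOID : List Int := [1, 2, 840]

def Spec_encodeOID (oid : List Int) (out : List Int) : Prop := out = encodeOID_alt oid
instance (oid : List Int) (out : List Int) : Decidable (Spec_encodeOID oid out) := by unfold Spec_encodeOID; infer_instance

-- ===== CLAIM =====
def Claim_equal_encodeOID : Prop :=
  ∀ (oid : List Int), Dom_encodeOID oid → Pre_encodeOID oid → Spec_encodeOID oid (encodeOID oid)

-- ===== LEMMAS AND PROOFS =====

-- proof-side spec: the 7-bit chunks of w, least-significant first (empty for w ≤ 0)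
def pvChunks (w : Int) : List Int :=
  if _h : w > 0 then
    PySem.Int.mod w 128 :: pvChunks (PySem.Int.floordiv w 128)
  else []
termination_by w.toNat
decreasing_by
  have h1 : PySem.Int.floordiv w 128 < w :=
    (PySem.Int.floordiv_lt_iff_lt_mul (by omega)).2 (by nlinarith)
  omega

theorem pvChunks_pos (w : Int) (h : 0 < w) :
    pvChunks w = PySem.Int.mod w 128 :: pvChunks (PySem.Int.floordiv w 128) := by
  rw [pvChunks]; simp [h]

theorem pvChunks_nonpos (w : Int) (h : ¬ 0 < w) : pvChunks w = [] := by
  rw [pvChunks]; simp [h]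

-- floor division composes: (a // B) // c = a // (c*B) for positive B, c
theorem pv_fd_comp (a B c : Int) (hB : 0 < B) (hc : 0 < c) :
    PySem.Int.floordiv (PySem.Int.floordiv a B) c = PySem.Int.floordiv a (c * B) := by
  have hq := (PySem.Int.floordiv_eq_iff_of_pos (a := a) (b := c * B)
                (q := PySem.Int.floordiv a (c * B)) (by positivity)).1 rfl
  refine (PySem.Int.floordiv_eq_iff_of_pos hc).2 ⟨?_, ?_⟩
  · exact (PySem.Int.le_floordiv_iff_mul_le hB).2 (by linarith [hq.1, mul_assoc (PySem.Int.floordiv a (c*B)) c B])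
  · exact (PySem.Int.floordiv_lt_iff_lt_mul hB).2 (by linarith [hq.2, mul_assoc (PySem.Int.floordiv a (c*B) + 1) c B])

-- A's while-loop is the reversed, marked chunk list prepended to the accumulator
theorem whileA_eq_chunks (val : Int) (seg : List Int) :
    encodeOID_whileA val seg = (pvChunks val).reverse.map (· + 0x80) ++ seg := by
  induction val, seg using encodeOID_whileA.induct with
  | case1 v s h ih =>
      rw [encodeOID_whileA, pvChunks_pos v h]
      simp only [h, dif_pos, List.reverse_cons, List.map_append, List.append_assoc]
      exact ih
  | case2 v s h =>
      rw [encodeOID_whileA, pvChunks_nonpos v h]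
      simp [h]

-- B's chunk counter counts the chunks still above level k
theorem countK_eq (val : Int) (k : Nat) :
    encodeOID_countK val k = k + (pvChunks (PySem.Int.floordiv val ((128:Int) ^ k))).length := by
  induction k using encodeOID_countK.induct val with
  | case1 k h ih =>
      rw [encodeOID_countK]
      have hpos : (0:Int) < PySem.Int.floordiv val ((128:Int) ^ k) :=
        (PySem.Int.le_floordiv_iff_mul_le (by positivity)).2 (by linarith)
      rw [dif_pos h, ih, pvChunks_pos _ hpos]
      have hcomp : PySem.Int.floordiv (PySem.Int.floordiv val ((128:Int) ^ k)) 128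
           = PySem.Int.floordiv val ((128:Int) ^ (k+1)) := by
        rw [pv_fd_comp val ((128:Int)^k) 128 (by positivity) (by omega)]
        ring_nf
      rw [hcomp]; simp; omega
  | case2 k h =>
      rw [encodeOID_countK, dif_neg h]
      have hle : PySem.Int.floordiv val ((128:Int) ^ k) < 1 :=
        (PySem.Int.floordiv_lt_iff_lt_mul (by positivity)).2 (by linarith)
      rw [pvChunks_nonpos _ (by omega)]; simp

-- chunk j of w (LSB order) is (w // 128^j) % 128
theorem pvChunks_getElem (w : Int) (j : Nat) (hj : j < (pvChunks w).length) :
    (pvChunks w)[j] = PySem.Int.mod (PySem.Int.floordiv w ((128:Int) ^ j)) 128 := by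
  induction w using pvChunks.induct generalizing j with
  | case1 v h ih =>
      rw [pvChunks_pos v h] at hj
      simp only [pvChunks_pos v h]
      cases j with
      | zero => simp [PySem.Int.floordiv]
      | succ j =>
          simp only [List.getElem_cons_succ]
          rw [ih j (by simpa using hj),
              pv_fd_comp v 128 ((128:Int)^j) (by omega) (by positivity)]
          ring_nf
  | case2 v h =>
      rw [pvChunks_nonpos v h] at hj
      simp at hj

-- the reversed marked chunk list, written as a big-endian indexed map
theorem rev_marked (w : Int) :
    (pvChunks w).reverse.map (· + 0x80)
      = (List.range (pvChunks w).length).map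
          (fun k => PySem.Int.mod
              (PySem.Int.floordiv w ((128:Int) ^ ((pvChunks w).length - 1 - k))) 128 + 0x80) := by
  apply List.ext_getElem
  · simp only [List.length_map, List.length_reverse, List.length_range]
  · intro j h1 h2
    simp only [List.getElem_map, List.getElem_reverse, List.getElem_range]
    simp only [List.length_map, List.length_reverse] at h1
    rw [pvChunks_getElem w _ (by omega)]

-- per-value: A's segment equals B's big-endian power extraction
theorem perVal_eq (val : Int) :
    encodeOID_whileA (PySem.Int.floordiv val 128) [PySem.Int.mod val 128]
      = ((PySem.List.pyRange ((encodeOID_countK val 1 : Int) - 1) 0 (-1)).map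
          (fun i => PySem.Int.mod (PySem.Int.floordiv val ((128:Int) ^ i.toNat)) 128 + 0x80))
        ++ [PySem.Int.mod val 128] := by
  have hk : encodeOID_countK val 1
      = 1 + (pvChunks (PySem.Int.floordiv val 128)).length := by
    have := countK_eq val 1
    rwa [pow_one] at this
  rw [whileA_eq_chunks, rev_marked]
  congr 1
  rw [PySem.List.pyRange_neg_one, List.map_map]
  have hN : (((encodeOID_countK val 1 : Nat) : Int) - 1 - 0).toNat
      = (pvChunks (PySem.Int.floordiv val 128)).length := by
    omega
  rw [hN]
  apply List.map_congr_left
  intro k hkmem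
  have hklt : k < (pvChunks (PySem.Int.floordiv val 128)).length := List.mem_range.1 hkmem
  show PySem.Int.mod (PySem.Int.floordiv (PySem.Int.floordiv val 128) _) 128 + 0x80
      = PySem.Int.mod (PySem.Int.floordiv val ((128:Int) ^ ((((encodeOID_countK val 1 : Nat) : Int) - 1 - (k : Int)).toNat))) 128 + 0x80
  have hi : ((((encodeOID_countK val 1 : Nat) : Int) - 1 - (k : Int)).toNat)
      = (pvChunks (PySem.Int.floordiv val 128)).length - k := by
    omega
  rw [hi, pv_fd_comp val 128 _ (by omega) (by positivity)]
  have hp : ((128:Int) ^ ((pvChunks (PySem.Int.floordiv val 128)).length - 1 - k)) * 128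
      = (128:Int) ^ ((pvChunks (PySem.Int.floordiv val 128)).length - k) := by
    rw [← pow_succ]
    congr 1
    omega
  rw [hp]

theorem encodeOID_eq_alt (oid : List Int) : encodeOID oid = encodeOID_alt oid := by
  unfold encodeOID encodeOID_alt
  show List.foldl _ [] _ = List.foldl _ [] _
  congr 1
  funext acc val
  show acc ++ encodeOID_whileA (PySem.Int.floordiv val 128) [PySem.Int.mod val 128]
     = ((PySem.List.pyRange ((encodeOID_countK val 1 : Int) - 1) 0 (-1)).foldl
          (fun out i =>
            out ++ [PySem.Int.mod (PySem.Int.floordiv val ((128:Int) ^ i.toNat)) 128 + 0x80]) acc)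
        ++ [PySem.Int.mod val 128]
  rw [PySem.List.foldl_append_singleton_eq_map, perVal_eq, List.append_assoc]

-- ===== VERDICT =====
theorem encodeOID_spec : Claim_equal_encodeOID := by
  intro oid _ _
  exact encodeOID_eq_alt oid
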